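-- pv_equiv track=rewrite | github.com/d-c-b/advent-of-code2023 | day13/solution.py | sum_line_of_symmetry_for_square
-- ===== SOURCE A (Python) =====
-- from collections import defaultdict
--
-- def symmetry_differences(pair: tuple[int, int], line: list[str]) -> int:
--     i, j = pair
--     differences = 0
--     while i >= 0 and j < len(line):
--         if line[i] != line[j]:
--             differences += 1
--
--         i, j = i - 1, j + 1
--
--     return differences
--
-- def sum_line_of_symmetry_for_square(
--     square: list[list[str]], number_of_differences: int = 0
-- ):
--     pairs = list(zip(range(len(square[0])), range(1, len(square[0]))))
--
--     diffs_for_pairs: defaultdict[tuple[int, int], int] = defaultdict(int)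
--
--     for line in square:
--         for pair in pairs:
--             diffs_for_pairs[pair] += symmetry_differences(pair, line)
--
--     possible_pairs = [
--         k for k, v in diffs_for_pairs.items() if v == number_of_differences
--     ]
--     return sum([smaller + 1 for smaller, _ in possible_pairs])
-- ===== SOURCE B (Python) =====
-- def sum_line_of_symmetry_for_square(square, number_of_differences=0):
--     # Bucket every mirrored cell-pair of every row into its axis index arithmetically:
--     # cells c1 < c2 of a row are reflections of each other across axis (c1 + c2 - 1) // 2
--     # exactly when c1 + c2 is odd.  One sweep over all cell pairs fills the per-axis
--     # mismatch table; the answer is then read off without touching the rows again.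
--     axis_mismatches = {}
--     for row in square:
--         for c2 in range(1, len(row)):
--             for c1 in range(c2):
--                 if (c1 + c2) % 2 == 1 and row[c1] != row[c2]:
--                     axis = (c1 + c2 - 1) // 2
--                     axis_mismatches[axis] = axis_mismatches.get(axis, 0) + 1
--     return sum(
--         i + 1
--         for i in range(len(square[0]) - 1)
--         if axis_mismatches.get(i, 0) == number_of_differences
--     )
-- ===== Notes on version B (the rewrite author's own statement) =====
-- stated objective: alternative
-- what changed: B never walks outward from an axis: it enumerates each row's cell pairs (c1,c2) once, keeps only the reflection pairs (c1+c2 odd), and buckets each mismatch arithmetically into axis (c1+c2-1)//2 in one global table, so A's expanding index-walk helper, its per-axis pair list and its (i,i+1)-keyed defaultdict threaded through the row scan all disappear; the answer is then read off the table without touching the rows again.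
-- outside the precondition, e.g. on sum_line_of_symmetry_for_square([], 0): A raises IndexError, B raises IndexError
import Mathlib
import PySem

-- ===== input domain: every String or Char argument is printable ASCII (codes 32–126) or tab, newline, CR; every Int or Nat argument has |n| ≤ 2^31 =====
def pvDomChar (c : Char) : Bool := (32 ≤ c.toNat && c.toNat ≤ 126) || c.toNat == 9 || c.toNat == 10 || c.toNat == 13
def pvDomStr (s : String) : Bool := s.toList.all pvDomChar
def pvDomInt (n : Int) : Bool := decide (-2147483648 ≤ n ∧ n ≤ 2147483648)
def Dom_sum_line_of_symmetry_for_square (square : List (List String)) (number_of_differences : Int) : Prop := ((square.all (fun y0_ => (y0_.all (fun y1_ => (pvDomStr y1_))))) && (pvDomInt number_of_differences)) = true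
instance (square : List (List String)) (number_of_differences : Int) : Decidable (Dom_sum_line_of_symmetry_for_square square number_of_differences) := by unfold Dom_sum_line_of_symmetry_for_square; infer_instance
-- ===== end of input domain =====

-- B buckets every mirrored cell pair of every row arithmetically into its axis in one sweep
-- (no per-axis outward walk, no pair list, no helper), then reads the table (objective: alternative).

-- ===== PORT A =====
-- the 'while i >= 0 and j < len(line)' loop of symmetry_differences, with its accumulator;
-- line[i]/line[j] are in range whenever the loop body runs on A's call pattern (i < j), so pyGetD is exact
def symDiffLoop (line : List String) (i j differences : Int) : Int :=
  if h : 0 ≤ i ∧ j < (line.length : Int) then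
    symDiffLoop line (i - 1) (j + 1)
      (differences + (if PySem.List.pyGetD line i "" ≠ PySem.List.pyGetD line j "" then 1 else 0))
  else differences
termination_by ((line.length : Int) - j).toNat
decreasing_by omega

def symmetry_differences (pair : Int × Int) (line : List String) : Int :=
  symDiffLoop line pair.1 pair.2 0

def sum_line_of_symmetry_for_square (square : List (List String)) (number_of_differences : Int) : Int :=
  let pairs := (PySem.List.pyRange 0 ((square.headD []).length : Int) 1).zip
               (PySem.List.pyRange 1 ((square.headD []).length : Int) 1)
  let diffs_for_pairs : PySem.Dict (Int × Int) Int :=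
    square.foldl (fun d line =>
        pairs.foldl (fun d pair => d.insert pair (d.getD pair 0 + symmetry_differences pair line)) d)
      PySem.Dict.empty
  let possible_pairs :=
    (diffs_for_pairs.items.filter (fun kv => kv.2 == number_of_differences)).map (fun kv => kv.1)
  (possible_pairs.map (fun p => p.1 + 1)).sum

-- ===== PORT B =====
-- Source B's triple loop filling the axis_mismatches table, then the gated sum over range(width-1)
def sum_line_of_symmetry_for_square_alt (square : List (List String)) (number_of_differences : Int) : Int :=
  let axis_mismatches : PySem.Dict Int Int :=
    square.foldl (fun d row =>
      (PySem.List.pyRange 1 (row.length : Int) 1).foldl (fun d c2 =>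
        (PySem.List.pyRange 0 c2 1).foldl (fun d c1 =>
          if PySem.Int.mod (c1 + c2) 2 = 1 ∧
             PySem.List.pyGetD row c1 "" ≠ PySem.List.pyGetD row c2 "" then
            d.insert (PySem.Int.floordiv (c1 + c2 - 1) 2)
              (d.getD (PySem.Int.floordiv (c1 + c2 - 1) 2) 0 + 1)
          else d) d) d)
      PySem.Dict.empty
  (PySem.List.pyRange 0 (((square.headD []).length : Int) - 1) 1).foldl
    (fun total i => if axis_mismatches.getD i 0 = number_of_differences then total + (i + 1) else total) 0

-- ===== PRECONDITION & SPEC =====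
-- Pre_ excludes only square = [], on which the Python A raises IndexError at square[0]
def Pre_sum_line_of_symmetry_for_square (square : List (List String)) (number_of_differences : Int) : Prop :=
  square ≠ []
instance (square : List (List String)) (number_of_differences : Int) : Decidable (Pre_sum_line_of_symmetry_for_square square number_of_differences) := by unfold Pre_sum_line_of_symmetry_for_square; infer_instance

def pvWitness_sum_line_of_symmetry_for_square : List (List String) × Int := ([["#", "#", "."]], 0)

def Spec_sum_line_of_symmetry_for_square (square : List (List String)) (number_of_differences : Int) (out : Int) : Prop := out = sum_line_of_symmetry_for_square_alt square number_of_differences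
instance (square : List (List String)) (number_of_differences : Int) (out : Int) : Decidable (Spec_sum_line_of_symmetry_for_square square number_of_differences out) := by unfold Spec_sum_line_of_symmetry_for_square; infer_instance

-- ===== CLAIM (what is proved, stated in full; the proofs are below) =====
def Claim_equal_sum_line_of_symmetry_for_square : Prop := ∀ (square : List (List String)) (number_of_differences : Int), Dom_sum_line_of_symmetry_for_square square number_of_differences → Pre_sum_line_of_symmetry_for_square square number_of_differences → Spec_sum_line_of_symmetry_for_square square number_of_differences (sum_line_of_symmetry_for_square square number_of_differences)

-- ===== LEMMAS AND PROOFS =====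

-- ---- A-side characterisation (dict of per-axis totals) ----

-- after the inner fold over a Nodup pair list, getD gains f q exactly on members
lemma getD_inner (f : Int × Int → Int) :
    ∀ (ps : List (Int × Int)) (d : PySem.Dict (Int × Int) Int), ps.Nodup → ∀ q,
      (ps.foldl (fun d p => d.insert p (d.getD p 0 + f p)) d).getD q 0
        = d.getD q 0 + (if q ∈ ps then f q else 0) := by
  intro ps
  induction ps with
  | nil => intro d _ q; simp
  | cons p ps ih =>
    intro d hnd q
    rw [List.foldl_cons, ih _ hnd.of_cons q]
    rw [PySem.Dict.getD_insert]
    by_cases hq : q = p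
    · subst hq
      have : q ∉ ps := (List.nodup_cons.mp hnd).1
      simp [this]
    · simp [hq, List.mem_cons]

lemma getD_outer (pairs : List (Int × Int)) (hnd : pairs.Nodup) :
    ∀ (rows : List (List String)) (d : PySem.Dict (Int × Int) Int) (q : Int × Int),
      (rows.foldl (fun d line => pairs.foldl
          (fun d p => d.insert p (d.getD p 0 + symmetry_differences p line)) d) d).getD q 0
        = d.getD q 0 + (if q ∈ pairs then (rows.map (fun r => symmetry_differences q r)).sum else 0) := by
  intro rows
  induction rows with
  | nil => intro d q; simp
  | cons r rows ih =>
    intro d q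
    rw [List.foldl_cons, ih, getD_inner (fun p => symmetry_differences p r) pairs d hnd q]
    simp only [List.map_cons, List.sum_cons]
    split_ifs <;> ring

lemma set_update_self (s : List (Int × Int)) : PySem.Set.update s s = s := by
  rw [PySem.Set.update_eq_append_filter]
  have h : (PySem.Set.ofList s).filter (fun y => !(PySem.Set.contains s y)) = [] := by
    rw [List.filter_eq_nil_iff]
    intro a ha
    have ha' : a ∈ s := (PySem.Set.mem_ofList _ _).mp ha
    simp [ha']
  rw [h, List.append_nil]

lemma keys_step (pairs : List (Int × Int)) (line : List String)
    (d : PySem.Dict (Int × Int) Int) :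
    (pairs.foldl (fun d p => d.insert p (d.getD p 0 + symmetry_differences p line)) d).keys
      = PySem.Set.update d.keys pairs :=
  PySem.Dict.keys_foldl_insert ..

lemma keys_outer (pairs : List (Int × Int)) (hnd : pairs.Nodup) :
    ∀ (rows : List (List String)), rows ≠ [] →
      (rows.foldl (fun d line => pairs.foldl
          (fun d p => d.insert p (d.getD p 0 + symmetry_differences p line)) d)
        PySem.Dict.empty).keys = pairs := by
  have step2 : ∀ (rows : List (List String)) (d : PySem.Dict (Int × Int) Int),
      d.keys = pairs →
      (rows.foldl (fun d line => pairs.foldl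
          (fun d p => d.insert p (d.getD p 0 + symmetry_differences p line)) d) d).keys = pairs := by
    intro rows
    induction rows with
    | nil => intro d h; simpa using h
    | cons r rows ih =>
      intro d h
      rw [List.foldl_cons]
      exact ih _ (by rw [keys_step, h, set_update_self])
  intro rows hne
  match rows with
  | r :: rows =>
    rw [List.foldl_cons]
    apply step2
    rw [keys_step]
    have h0 : (PySem.Dict.empty : PySem.Dict (Int × Int) Int).keys = [] := by decide
    rw [h0, PySem.Set.update_nil_left]
    exact PySem.Set.ofList_eq_self_of_nodup _ hnd

-- a dict with Nodup keys is its key list paired with its lookups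
lemma items_eq_keys_map (d : PySem.Dict (Int × Int) Int) (h : d.keys.Nodup) :
    d.items = d.keys.map (fun k => (k, d.getD k 0)) := by
  simp only [PySem.Dict.keys, List.map_map]
  have hc : ∀ it ∈ d.items, ((fun k => (k, d.getD k 0)) ∘ (fun p => p.1)) it = it := by
    intro it hit
    have hmem : (it.1, it.2) ∈ d.items := by simpa using hit
    have hv := PySem.Dict.getD_of_mem_items (d := d) (k := it.1) (v := it.2) (d0 := (0:Int)) hmem h
    simp [Function.comp, hv]
  rw [List.map_congr_left hc]
  simp

-- A's zip of the two ranges is the list of adjacent pairs (k, k+1), k < n-1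
lemma pairs_eq (n : Nat) :
    (PySem.List.pyRange 0 (n : Int) 1).zip (PySem.List.pyRange 1 (n : Int) 1)
      = (List.range (n - 1)).map (fun (k : Nat) => ((k : Int), (k : Int) + 1)) := by
  apply List.ext_getElem
  · simp [PySem.List.length_pyRange_one]
  · intro i h1 h2
    rw [List.getElem_zip, List.getElem_map, List.getElem_range,
        PySem.List.getElem_pyRange_one, PySem.List.getElem_pyRange_one]
    simp only [Prod.mk.injEq]
    constructor <;> omega

lemma sum_filter_map {α : Type} (l : List α) (q : α → Bool) (f : α → Int) :
    ((l.filter q).map f).sum = (l.map (fun x => if q x then f x else 0)).sum := by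
  induction l with
  | nil => simp
  | cons x l ih => by_cases h : q x <;> simp [h, ih]

lemma nodup_pairsR (n : Nat) :
    ((List.range (n - 1)).map (fun (k : Nat) => ((k : Int), (k : Int) + 1))).Nodup := by
  refine (List.nodup_range).map ?_
  intro a b h
  simpa using congrArg Prod.fst h

-- ---- B-side characterisation (bucket table) ----

-- generic: a fold that conditionally bumps one bucket adds the matching count to each lookup
lemma getD_foldl_bucket (key : Int → Int) (P : Int → Prop) [DecidablePred P] :
    ∀ (xs : List Int) (d : PySem.Dict Int Int) (q : Int),
      (xs.foldl (fun d x => if P x then d.insert (key x) (d.getD (key x) 0 + 1) else d) d).getD q 0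
        = d.getD q 0 + ((xs.countP (fun x => decide (P x) && (key x == q)) : Int)) := by
  intro xs
  induction xs with
  | nil => intro d q; simp
  | cons x xs ih =>
    intro d q
    rw [List.foldl_cons, List.countP_cons]
    by_cases hx : P x
    · rw [if_pos hx, ih, PySem.Dict.getD_insert]
      by_cases hk : q = key x
      · simp [hx, hk]; ring
      · have : ¬ (key x == q) = true := by simp [Ne.symm hk]
        simp [hx, hk, this]
    · rw [if_neg hx, ih]
      simp [hx]

-- generic: a dict fold whose step adds g x to bucket q adds the sum of g
lemma getD_foldl_add {α : Type} (step : PySem.Dict Int Int → α → PySem.Dict Int Int)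
    (g : α → Int) (q : Int)
    (h : ∀ (d : PySem.Dict Int Int) (x : α), (step d x).getD q 0 = d.getD q 0 + g x) :
    ∀ (l : List α) (d : PySem.Dict Int Int),
      (l.foldl step d).getD q 0 = d.getD q 0 + (l.map g).sum := by
  intro l
  induction l with
  | nil => intro d; simp
  | cons x l ih => intro d; rw [List.foldl_cons, ih, h]; simp; ring

-- the inner c1-count collapses: at most one c1 (= 2a+1-c2) hits axis a
lemma countP_unique (p : Int → Bool) (v : Int) :
    ∀ (l : List Int), l.Nodup → (∀ x ∈ l, p x = true → x = v) →
      l.countP p = if v ∈ l ∧ p v then 1 else 0 := by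
  intro l
  induction l with
  | nil => intro _ _; simp
  | cons x l ih =>
    intro hnd hu
    rw [List.countP_cons, ih hnd.of_cons (fun y hy => hu y (List.mem_cons_of_mem _ hy))]
    by_cases hpx : p x
    · have hxv : v = x := (hu x List.mem_cons_self hpx).symm
      subst hxv
      have hnl : v ∉ l := (List.nodup_cons.mp hnd).1
      simp [hpx, hnl]
    · have hiff : (v ∈ x :: l ∧ p v = true) ↔ (v ∈ l ∧ p v = true) := by
        constructor
        · rintro ⟨hm, hp⟩
          rcases List.mem_cons.mp hm with rfl | hm'
          · exact absurd hp (by simp [hpx])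
          · exact ⟨hm', hp⟩
        · rintro ⟨hm, hp⟩
          exact ⟨List.mem_cons_of_mem _ hm, hp⟩
      rw [if_congr hiff rfl rfl]
      simp [hpx]

lemma inner_count_eq (row : List String) (c2 : Int) (a : Nat) :
    ((PySem.List.pyRange 0 c2 1).countP (fun c1 =>
        decide (PySem.Int.mod (c1 + c2) 2 = 1 ∧
          PySem.List.pyGetD row c1 "" ≠ PySem.List.pyGetD row c2 "") &&
        (PySem.Int.floordiv (c1 + c2 - 1) 2 == (a : Int))))
      = if ((a : Int) < c2 ∧ c2 ≤ 2 * (a : Int) + 1 ∧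
            PySem.List.pyGetD row (2 * (a : Int) + 1 - c2) "" ≠ PySem.List.pyGetD row c2 "")
        then 1 else 0 := by
  set v : Int := 2 * (a : Int) + 1 - c2 with hv
  have hval : ∀ x ∈ PySem.List.pyRange 0 c2 1,
      (decide (PySem.Int.mod (x + c2) 2 = 1 ∧
          PySem.List.pyGetD row x "" ≠ PySem.List.pyGetD row c2 "") &&
        (PySem.Int.floordiv (x + c2 - 1) 2 == (a : Int))) = true → x = v := by
    intro x _ hx
    simp only [Bool.and_eq_true, decide_eq_true_eq, beq_iff_eq] at hx
    obtain ⟨⟨hm, _⟩, hd⟩ := hx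
    rw [PySem.Int.mod_eq_emod_of_pos (by norm_num)] at hm
    rw [PySem.Int.floordiv_eq_ediv_of_pos (by norm_num)] at hd
    omega
  rw [countP_unique _ v _ (PySem.List.nodup_pyRange_one 0 c2) hval]
  by_cases hb : (a : Int) < c2 ∧ c2 ≤ 2 * (a : Int) + 1
  · have hvmem : v ∈ PySem.List.pyRange 0 c2 1 := by
      rw [PySem.List.mem_pyRange_one]; omega
    by_cases hmm : PySem.List.pyGetD row v "" ≠ PySem.List.pyGetD row c2 ""
    · rw [if_pos ⟨hvmem, by simp [hmm]; omega⟩, if_pos ⟨hb.1, hb.2, hmm⟩]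
    · rw [if_neg (by simp [hmm]), if_neg (by tauto)]
  · rw [if_neg, if_neg (by tauto)]
    rintro ⟨hvmem, -⟩
    rw [PySem.List.mem_pyRange_one] at hvmem
    omega

-- A's outward walk equals the tail of the gated c2-sum
lemma symDiffLoop_eq_sum (row : List String) (a : Nat) :
    ∀ (m : Nat) (j i acc : Int), ((row.length : Int) - j).toNat ≤ m →
      i + j = 2 * (a : Int) + 1 → i < j →
      symDiffLoop row i j acc
        = acc + ((PySem.List.pyRange j (row.length : Int) 1).map (fun c2 =>
            if ((a : Int) < c2 ∧ c2 ≤ 2 * (a : Int) + 1 ∧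
                PySem.List.pyGetD row (2 * (a : Int) + 1 - c2) "" ≠ PySem.List.pyGetD row c2 "")
            then (1 : Int) else 0)).sum := by
  intro m
  induction m with
  | zero =>
    intro j i acc hm hij hlt
    rw [symDiffLoop, dif_neg (by omega), PySem.List.pyRange_one_eq_nil (by omega)]
    simp
  | succ m ih =>
    intro j i acc hm hij hlt
    by_cases h : 0 ≤ i ∧ j < (row.length : Int)
    · have hi : i = 2 * (a : Int) + 1 - j := by omega
      subst hi
      rw [symDiffLoop, dif_pos h,
          ih (j + 1) (2 * (a : Int) + 1 - j - 1) _ (by omega) (by omega) (by omega),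
          PySem.List.pyRange_one_cons h.2]
      simp only [List.map_cons, List.sum_cons]
      have hgate : (a : Int) < j ∧ j ≤ 2 * (a : Int) + 1 := by omega
      by_cases hmm : PySem.List.pyGetD row (2 * (a : Int) + 1 - j) "" ≠ PySem.List.pyGetD row j ""
      · rw [if_pos hmm, if_pos ⟨hgate.1, hgate.2, hmm⟩]
        ring
      · rw [if_neg hmm, if_neg (by tauto)]
        ring
    · rw [symDiffLoop, dif_neg h]
      rcases not_and_or.mp h with hneg | hge
      · have hz : ∀ c2 ∈ PySem.List.pyRange j (row.length : Int) 1,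
            (if ((a : Int) < c2 ∧ c2 ≤ 2 * (a : Int) + 1 ∧
                PySem.List.pyGetD row (2 * (a : Int) + 1 - c2) "" ≠ PySem.List.pyGetD row c2 "")
             then (1 : Int) else 0) = 0 := by
          intro c2 hc2
          rw [PySem.List.mem_pyRange_one] at hc2
          rw [if_neg (by omega)]
        rw [List.map_congr_left hz]
        simp
      · rw [PySem.List.pyRange_one_eq_nil (by omega)]
        simp

-- per row: the gated sum over all c2 in [1, len) equals A's helper at axis a
lemma row_axis_eq (row : List String) (a : Nat) :
    ((PySem.List.pyRange 1 (row.length : Int) 1).map (fun c2 =>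
        ((PySem.List.pyRange 0 c2 1).countP (fun c1 =>
          decide (PySem.Int.mod (c1 + c2) 2 = 1 ∧
            PySem.List.pyGetD row c1 "" ≠ PySem.List.pyGetD row c2 "") &&
          (PySem.Int.floordiv (c1 + c2 - 1) 2 == (a : Int))) : Int))).sum
      = symmetry_differences ((a : Int), (a : Int) + 1) row := by
  have hmap : ∀ c2 ∈ PySem.List.pyRange 1 (row.length : Int) 1,
      ((PySem.List.pyRange 0 c2 1).countP (fun c1 =>
          decide (PySem.Int.mod (c1 + c2) 2 = 1 ∧
            PySem.List.pyGetD row c1 "" ≠ PySem.List.pyGetD row c2 "") &&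
          (PySem.Int.floordiv (c1 + c2 - 1) 2 == (a : Int))) : Int)
        = (if ((a : Int) < c2 ∧ c2 ≤ 2 * (a : Int) + 1 ∧
              PySem.List.pyGetD row (2 * (a : Int) + 1 - c2) "" ≠ PySem.List.pyGetD row c2 "")
           then (1 : Int) else 0) := by
    intro c2 _
    rw [inner_count_eq row c2 a]
    split_ifs <;> simp
  rw [List.map_congr_left hmap]
  unfold symmetry_differences
  rw [symDiffLoop_eq_sum row a (((row.length : Int) - ((a : Int) + 1)).toNat)
      ((a : Int) + 1) (a : Int) 0 le_rfl (by ring) (by omega), zero_add]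
  by_cases hL : (a : Int) + 1 ≤ (row.length : Int)
  · rw [PySem.List.pyRange_one_append 1 ((a : Int) + 1) (row.length : Int) (by omega) hL,
        List.map_append, List.sum_append]
    have hz : ∀ c2 ∈ PySem.List.pyRange 1 ((a : Int) + 1) 1,
        (if ((a : Int) < c2 ∧ c2 ≤ 2 * (a : Int) + 1 ∧
            PySem.List.pyGetD row (2 * (a : Int) + 1 - c2) "" ≠ PySem.List.pyGetD row c2 "")
         then (1 : Int) else 0) = 0 := by
      intro c2 hc2
      rw [PySem.List.mem_pyRange_one] at hc2
      rw [if_neg (by omega)]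
    rw [List.map_congr_left hz]
    simp
  · have hz : ∀ c2 ∈ PySem.List.pyRange 1 (row.length : Int) 1,
        (if ((a : Int) < c2 ∧ c2 ≤ 2 * (a : Int) + 1 ∧
            PySem.List.pyGetD row (2 * (a : Int) + 1 - c2) "" ≠ PySem.List.pyGetD row c2 "")
         then (1 : Int) else 0) = 0 := by
      intro c2 hc2
      rw [PySem.List.mem_pyRange_one] at hc2
      rw [if_neg (by omega)]
    rw [PySem.List.pyRange_one_eq_nil (a := (a : Int) + 1) (b := (row.length : Int)) (by omega),
        List.map_congr_left hz]
    simp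

-- the whole B table lookup at axis a is the A per-axis total
lemma table_getD_eq (square : List (List String)) (a : Nat) :
    (square.foldl (fun d row =>
      (PySem.List.pyRange 1 (row.length : Int) 1).foldl (fun d c2 =>
        (PySem.List.pyRange 0 c2 1).foldl (fun d c1 =>
          if PySem.Int.mod (c1 + c2) 2 = 1 ∧
             PySem.List.pyGetD row c1 "" ≠ PySem.List.pyGetD row c2 "" then
            d.insert (PySem.Int.floordiv (c1 + c2 - 1) 2)
              (d.getD (PySem.Int.floordiv (c1 + c2 - 1) 2) 0 + 1)
          else d) d) d)
      PySem.Dict.empty).getD (a : Int) 0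
      = (square.map (fun r => symmetry_differences ((a : Int), (a : Int) + 1) r)).sum := by
  have hmid : ∀ (d : PySem.Dict Int Int) (row : List String),
      ((PySem.List.pyRange 1 (row.length : Int) 1).foldl (fun d c2 =>
        (PySem.List.pyRange 0 c2 1).foldl (fun d c1 =>
          if PySem.Int.mod (c1 + c2) 2 = 1 ∧
             PySem.List.pyGetD row c1 "" ≠ PySem.List.pyGetD row c2 "" then
            d.insert (PySem.Int.floordiv (c1 + c2 - 1) 2)
              (d.getD (PySem.Int.floordiv (c1 + c2 - 1) 2) 0 + 1)
          else d) d) d).getD (a : Int) 0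
        = d.getD (a : Int) 0 + symmetry_differences ((a : Int), (a : Int) + 1) row := by
    intro d row
    have hinner : ∀ (d : PySem.Dict Int Int) (c2 : Int),
        ((PySem.List.pyRange 0 c2 1).foldl (fun d c1 =>
          if PySem.Int.mod (c1 + c2) 2 = 1 ∧
             PySem.List.pyGetD row c1 "" ≠ PySem.List.pyGetD row c2 "" then
            d.insert (PySem.Int.floordiv (c1 + c2 - 1) 2)
              (d.getD (PySem.Int.floordiv (c1 + c2 - 1) 2) 0 + 1)
          else d) d).getD (a : Int) 0
          = d.getD (a : Int) 0 + ((PySem.List.pyRange 0 c2 1).countP (fun c1 =>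
              decide (PySem.Int.mod (c1 + c2) 2 = 1 ∧
                PySem.List.pyGetD row c1 "" ≠ PySem.List.pyGetD row c2 "") &&
              (PySem.Int.floordiv (c1 + c2 - 1) 2 == (a : Int))) : Int) := by
      intro d c2
      exact getD_foldl_bucket (key := fun c1 => PySem.Int.floordiv (c1 + c2 - 1) 2)
        (P := fun c1 => PySem.Int.mod (c1 + c2) 2 = 1 ∧
          PySem.List.pyGetD row c1 "" ≠ PySem.List.pyGetD row c2 "")
        (PySem.List.pyRange 0 c2 1) d (a : Int)
    rw [getD_foldl_add _ _ _ hinner (PySem.List.pyRange 1 (row.length : Int) 1) d,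
        row_axis_eq row a]
  rw [getD_foldl_add _ _ _ hmid square PySem.Dict.empty]
  simp

-- ---- assembly ----

-- A's value as a gated sum over the axes
lemma A_eq_sum (square : List (List String)) (nd : Int) (hpre : square ≠ []) :
    sum_line_of_symmetry_for_square square nd
      = ((List.range ((square.headD []).length - 1)).map (fun (k : Nat) =>
          if (square.map (fun r => symmetry_differences ((k : Int), (k : Int) + 1) r)).sum = nd
          then ((k : Int) + 1) else 0)).sum := by
  unfold sum_line_of_symmetry_for_square
  simp only []
  set n := (square.headD []).length with hn
  rw [pairs_eq n]
  set pairsR := (List.range (n - 1)).map (fun (k : Nat) => ((k : Int), (k : Int) + 1)) with hpR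
  set D := square.foldl (fun d line =>
      pairsR.foldl (fun d pair => d.insert pair (d.getD pair 0 + symmetry_differences pair line)) d)
    PySem.Dict.empty with hD
  have hkeys : D.keys = pairsR := keys_outer pairsR (nodup_pairsR n) square hpre
  have hitems : D.items = pairsR.map (fun p => (p, D.getD p 0)) := by
    rw [items_eq_keys_map D (by rw [hkeys]; exact nodup_pairsR n), hkeys]
  rw [hitems, List.filter_map, List.map_map, List.map_map, sum_filter_map, List.map_map]
  apply congrArg List.sum
  apply List.map_congr_left
  intro k hk
  simp only [Function.comp]
  have hG : D.getD ((k : Int), (k : Int) + 1) 0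
      = (square.map (fun r => symmetry_differences ((k : Int), (k : Int) + 1) r)).sum := by
    rw [hD, getD_outer pairsR (nodup_pairsR n) square PySem.Dict.empty]
    have hmem : ((k : Int), (k : Int) + 1) ∈ pairsR := by
      rw [hpR]; exact List.mem_map.mpr ⟨k, hk, rfl⟩
    simp [hmem]
  rw [hG]
  split_ifs with h1 h2 h2 <;> simp_all

-- B's value as the same gated sum
lemma B_eq_sum (square : List (List String)) (nd : Int) :
    sum_line_of_symmetry_for_square_alt square nd
      = ((List.range ((square.headD []).length - 1)).map (fun (k : Nat) =>
          if (square.map (fun r => symmetry_differences ((k : Int), (k : Int) + 1) r)).sum = nd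
          then ((k : Int) + 1) else 0)).sum := by
  unfold sum_line_of_symmetry_for_square_alt
  simp only []
  set n := (square.headD []).length with hn
  set T : PySem.Dict Int Int := square.foldl (fun d row =>
      (PySem.List.pyRange 1 (row.length : Int) 1).foldl (fun d c2 =>
        (PySem.List.pyRange 0 c2 1).foldl (fun d c1 =>
          if PySem.Int.mod (c1 + c2) 2 = 1 ∧
             PySem.List.pyGetD row c1 "" ≠ PySem.List.pyGetD row c2 "" then
            d.insert (PySem.Int.floordiv (c1 + c2 - 1) 2)
              (d.getD (PySem.Int.floordiv (c1 + c2 - 1) 2) 0 + 1)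
          else d) d) d)
      PySem.Dict.empty with hT
  have hB : (PySem.List.pyRange 0 ((n : Int) - 1) 1).foldl (fun total i =>
        if T.getD i 0 = nd then total + (i + 1) else total) 0
      = ((PySem.List.pyRange 0 ((n : Int) - 1) 1).map (fun i =>
          if T.getD i 0 = nd then (i + 1) else 0)).sum := by
    have hcongr := PySem.List.foldl_congr_mem (init := (0:Int))
        (l := PySem.List.pyRange 0 ((n : Int) - 1) 1)
        (f := fun total i => if T.getD i 0 = nd then total + (i + 1) else total)
        (g := fun total i => total + (if T.getD i 0 = nd then (i + 1) else 0))
        (fun acc x _ => by simp only []; split_ifs <;> simp)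
    rw [hcongr, PySem.List.foldl_add]
    simp
  rw [hB]
  have hr : PySem.List.pyRange 0 ((n : Int) - 1) 1
      = (List.range (n - 1)).map (fun (k : Nat) => (k : Int)) := by
    apply List.ext_getElem
    · simp [PySem.List.length_pyRange_one]
    · intro i h1 h2
      rw [PySem.List.getElem_pyRange_one, List.getElem_map, List.getElem_range]
      omega
  rw [hr, List.map_map]
  apply congrArg List.sum
  apply List.map_congr_left
  intro k hk
  simp only [Function.comp]
  rw [hT, table_getD_eq square k]

theorem main_eq (square : List (List String)) (nd : Int) (hpre : square ≠ []) :
    sum_line_of_symmetry_for_square square nd = sum_line_of_symmetry_for_square_alt square nd := by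
  rw [A_eq_sum square nd hpre, B_eq_sum square nd]

-- ===== VERDICT (by name: the statement is the Claim_ definition above) =====
theorem sum_line_of_symmetry_for_square_spec : Claim_equal_sum_line_of_symmetry_for_square := by
  intro square nd _ hpre
  unfold Spec_sum_line_of_symmetry_for_square
  exact main_eq square nd hpre
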